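-- pv_equiv track=rewrite | github.com/YokoNat/Task-Gen-Sil | Task Gen/ui_main.py | parse_extra_filter
-- ===== SOURCE A (Python) =====
-- def parse_extra_filter(value):
--     # Parse 'Section:Price, Section2:Price2' into [(Section, Price), ...]
--     # Handle cases like 'FLR1:350, FLR2,FLR3,FLR4:326, FLR6:250'
--     if not value or not isinstance(value, str):
--         return []
--     filters = []
--
--     # Split on commas that are followed by a space and then a section:price pattern
--     # This preserves commas within the section part
--     parts = []
--     current_part = []
--     for item in value.split(','):
--         item = item.strip()
--         if ':' in item:
--             # If we have accumulated items, add them to the current part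
--             if current_part:
--                 current_part.append(item)
--                 parts.append(','.join(current_part))
--                 current_part = []
--             else:
--                 parts.append(item)
--         else:
--             current_part.append(item)
--
--     # Add any remaining items
--     if current_part:
--         parts.append(','.join(current_part))
--
--     # Process each part
--     for part in parts:
--         if ':' in part:
--             # Split on the last colon to handle sections that might contain colons
--             sections, price = part.rsplit(':', 1)
--             # Keep the sections together as one filter
--             filters.append((sections.strip(), price.strip()))
--         elif part:
--             filters.append((part.strip(), ''))
--
--     return filters
-- ===== SOURCE B (Python) =====
-- def parse_extra_filter(value):
--     # Single streaming pass: accumulate colon-less tokens, emit a filter as soon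
--     # as a token containing ':' is seen; no intermediate `parts` list.
--     if not value or not isinstance(value, str):
--         return []
--     filters = []
--     acc = []
--     for token in value.split(','):
--         token = token.strip()
--         if ':' in token:
--             sec, price = token.rsplit(':', 1)
--             sections = ','.join(acc + [sec])
--             filters.append((sections.strip(), price.strip()))
--             acc = []
--         else:
--             acc.append(token)
--     joined = ','.join(acc)
--     if joined:
--         filters.append((joined.strip(), ''))
--     return filters
-- ===== Notes on version B (the rewrite author's own statement) =====
-- stated objective: simpler
-- what changed: A's two passes (first build an intermediate parts list by grouping tokens, then re-scan each part for a colon and rsplit it) are fused into one streaming pass that emits each (sections, price) filter as soon as a colon-carrying token is seen, so the intermediate list and the second loop disappear.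
import Mathlib
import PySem

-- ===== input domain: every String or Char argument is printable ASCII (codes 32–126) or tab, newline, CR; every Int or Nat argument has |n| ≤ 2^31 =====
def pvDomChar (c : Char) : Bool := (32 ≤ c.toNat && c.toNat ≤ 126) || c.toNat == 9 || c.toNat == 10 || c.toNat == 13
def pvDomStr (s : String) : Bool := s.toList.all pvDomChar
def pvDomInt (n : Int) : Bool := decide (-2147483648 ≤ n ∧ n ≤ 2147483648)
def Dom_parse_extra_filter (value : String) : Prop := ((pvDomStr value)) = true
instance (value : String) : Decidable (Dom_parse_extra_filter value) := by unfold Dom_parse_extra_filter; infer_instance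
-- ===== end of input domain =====

-- B replaces A's two passes (build a `parts` list, then process it) by one streaming pass
-- that emits each filter as soon as a colon-carrying token is seen (objective: simpler/one pass; same cost class).

-- s.rsplit(':', 1) on the char list, split at the LAST ':'; exact whenever ':' is in the
-- string, which is the only case both Pythons call it in (guarded by "':' in part").
def pvRsplitColon (cs : List Char) : List Char × List Char :=
  match cs with
  | [] => ([], [])
  | c :: rest =>
    if ':' ∈ rest then
      ((c :: (pvRsplitColon rest).1), (pvRsplitColon rest).2)
    else if c = ':' then ([], rest)
    else (c :: rest, [])

def pvRsplitColonStr (s : String) : String × String :=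
  (String.ofList (pvRsplitColon s.toList).1, String.ofList (pvRsplitColon s.toList).2)

-- "':' in s"
def pvColon (s : String) : Bool := PySem.Str.isIn ":" s

-- ===== PORT A =====
-- first loop of A: accumulate colon-less stripped tokens, flush into `parts`
def pvStepA (st : List String × List String) (item : String) : List String × List String :=
  let item := PySem.Str.strip item
  if pvColon item then
    if st.2 ≠ [] then (st.1 ++ [PySem.Str.join "," (st.2 ++ [item])], [])
    else (st.1 ++ [item], [])
  else (st.1, st.2 ++ [item])

-- second loop of A: turn each part into a (sections, price) filter
def pvStepA2 (filters : List (String × String)) (part : String) : List (String × String) :=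
  if pvColon part then
    filters ++ [(PySem.Str.strip (pvRsplitColonStr part).1, PySem.Str.strip (pvRsplitColonStr part).2)]
  else if part ≠ "" then filters ++ [(PySem.Str.strip part, "")]
  else filters

def parse_extra_filter (value : String) : List (String × String) :=
  if value = "" then []
  else
    -- value.split(','): the separator "," is nonempty so split? is never none
    let tokens := (PySem.Str.split? value ",").getD []
    let st := tokens.foldl pvStepA ([], [])
    let parts := if st.2 ≠ [] then st.1 ++ [PySem.Str.join "," st.2] else st.1
    parts.foldl pvStepA2 []

-- ===== PORT B =====
-- B's single loop: emit a filter the moment a colon-carrying token is seen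
def pvStepB (st : List (String × String) × List String) (token : String) :
    List (String × String) × List String :=
  let token := PySem.Str.strip token
  if pvColon token then
    (st.1 ++ [(PySem.Str.strip (PySem.Str.join "," (st.2 ++ [(pvRsplitColonStr token).1])),
               PySem.Str.strip (pvRsplitColonStr token).2)], [])
  else (st.1, st.2 ++ [token])

def parse_extra_filter_alt (value : String) : List (String × String) :=
  if value = "" then []
  else
    let tokens := (PySem.Str.split? value ",").getD []
    let st := tokens.foldl pvStepB ([], [])
    let joined := PySem.Str.join "," st.2
    if joined ≠ "" then st.1 ++ [(PySem.Str.strip joined, "")] else st.1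

-- ===== PRECONDITION & SPEC =====
def Spec_parse_extra_filter (value : String) (out : List (String × String)) : Prop := out = parse_extra_filter_alt value
instance (value : String) (out : List (String × String)) : Decidable (Spec_parse_extra_filter value out) := by unfold Spec_parse_extra_filter; infer_instance

-- ===== CLAIM (what is proved, stated in full; the proofs are below) =====
def Claim_equal_parse_extra_filter : Prop := ∀ (value : String), Dom_parse_extra_filter value → Spec_parse_extra_filter value (parse_extra_filter value)

-- ===== LEMMAS AND PROOFS =====

-- what A's second loop appends for a single part
def pvEmit (part : String) : List (String × String) :=
  if pvColon part then
    [(PySem.Str.strip (pvRsplitColonStr part).1, PySem.Str.strip (pvRsplitColonStr part).2)]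
  else if part ≠ "" then [(PySem.Str.strip part, "")]
  else []

-- the parts A's first loop produces from the remaining tokens, given the pending accumulator
def pvPartsOf : List String → List String → List String
  | [], cur => if cur ≠ [] then [PySem.Str.join "," cur] else []
  | t :: ts, cur =>
    let t' := PySem.Str.strip t
    if pvColon t' then
      (if cur ≠ [] then [PySem.Str.join "," (cur ++ [t'])] else [t']) ++ pvPartsOf ts []
    else pvPartsOf ts (cur ++ [t'])

-- the filters B's loop produces from the remaining tokens, given the pending accumulator
def pvAltOf : List String → List String → List (String × String)
  | [], acc =>
    if PySem.Str.join "," acc ≠ "" then [(PySem.Str.strip (PySem.Str.join "," acc), "")] else []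
  | t :: ts, acc =>
    let t' := PySem.Str.strip t
    if pvColon t' then
      (PySem.Str.strip (PySem.Str.join "," (acc ++ [(pvRsplitColonStr t').1])),
       PySem.Str.strip (pvRsplitColonStr t').2) :: pvAltOf ts []
    else pvAltOf ts (acc ++ [t'])

lemma pv_toList_ofList (l : List Char) : (String.ofList l).toList = l := by
  simp

lemma pv_toList_comma : ("," : String).toList = [','] := by
  rfl

lemma pv_join_nil : PySem.Str.join "," ([] : List String) = "" := by
  apply String.toList_inj.mp
  simp [PySem.Str.toList_join, PySem.Chars.join_nil]

-- ':' ∈ s phrased through pvColon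
lemma pv_isIn_colon (s : String) : pvColon s = true ↔ ':' ∈ s.toList := by
  show PySem.Str.isIn ":" s = true ↔ _
  rw [PySem.Str.isIn_eq, PySem.Chars.isIn_iff_infix]
  exact List.singleton_infix_iff _ _

lemma pv_colon_empty : pvColon "" = false := by
  rw [Bool.eq_false_iff]
  intro hc
  have h2 := (pv_isIn_colon "").mp hc
  simp at h2

lemma pv_stepA2_emit (fs : List (String × String)) (p : String) :
    pvStepA2 fs p = fs ++ pvEmit p := by
  by_cases hc : pvColon p = true <;> by_cases hp : p = "" <;>
    simp [pvStepA2, pvEmit, hc, hp, pv_colon_empty]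

lemma pv_foldlA1 (ts : List String) : ∀ (ps cur : List String),
    (if (ts.foldl pvStepA (ps, cur)).2 ≠ [] then
        (ts.foldl pvStepA (ps, cur)).1 ++ [PySem.Str.join "," (ts.foldl pvStepA (ps, cur)).2]
      else (ts.foldl pvStepA (ps, cur)).1) = ps ++ pvPartsOf ts cur := by
  induction ts with
  | nil =>
    intro ps cur
    by_cases h : cur = [] <;> simp [pvPartsOf, h]
  | cons t ts ih =>
    intro ps cur
    by_cases hc : pvColon (PySem.Str.strip t) = true
    · by_cases h : cur = []
      · have hstep : pvStepA (ps, cur) t = (ps ++ [PySem.Str.strip t], []) := by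
          simp [pvStepA, hc, h]
        rw [List.foldl_cons, hstep, ih]
        simp [pvPartsOf, hc, h, List.append_assoc]
      · have hstep : pvStepA (ps, cur) t
            = (ps ++ [PySem.Str.join "," (cur ++ [PySem.Str.strip t])], []) := by
          simp [pvStepA, hc, h]
        rw [List.foldl_cons, hstep, ih]
        simp [pvPartsOf, hc, h, List.append_assoc]
    · have hstep : pvStepA (ps, cur) t = (ps, cur ++ [PySem.Str.strip t]) := by
        simp [pvStepA, hc]
      rw [List.foldl_cons, hstep, ih]
      simp [pvPartsOf, hc]

lemma pv_foldlA2 (parts : List String) : ∀ (fs : List (String × String)),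
    parts.foldl pvStepA2 fs = fs ++ parts.flatMap pvEmit := by
  induction parts with
  | nil => intro fs; simp
  | cons p ps ih =>
    intro fs
    rw [List.foldl_cons, pv_stepA2_emit, ih, List.flatMap_cons, List.append_assoc]

lemma pv_foldlB (ts : List String) : ∀ (fs : List (String × String)) (acc : List String),
    (if PySem.Str.join "," (ts.foldl pvStepB (fs, acc)).2 ≠ "" then
        (ts.foldl pvStepB (fs, acc)).1
          ++ [(PySem.Str.strip (PySem.Str.join "," (ts.foldl pvStepB (fs, acc)).2), "")]
      else (ts.foldl pvStepB (fs, acc)).1) = fs ++ pvAltOf ts acc := by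
  induction ts with
  | nil =>
    intro fs acc
    by_cases h : PySem.Str.join "," acc = "" <;> simp [pvAltOf, h]
  | cons t ts ih =>
    intro fs acc
    by_cases hc : pvColon (PySem.Str.strip t) = true
    · have hstep : pvStepB (fs, acc) t
          = (fs ++ [(PySem.Str.strip (PySem.Str.join ","
              (acc ++ [(pvRsplitColonStr (PySem.Str.strip t)).1])),
              PySem.Str.strip (pvRsplitColonStr (PySem.Str.strip t)).2)], []) := by
        simp [pvStepB, hc]
      rw [List.foldl_cons, hstep, ih]
      simp [pvAltOf, hc, List.append_assoc]
    · have hstep : pvStepB (fs, acc) t = (fs, acc ++ [PySem.Str.strip t]) := by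
        simp [pvStepB, hc]
      rw [List.foldl_cons, hstep, ih]
      simp [pvAltOf, hc]

lemma pv_join_singleton (s : String) : PySem.Str.join "," [s] = s := by
  apply String.toList_inj.mp
  rw [PySem.Str.toList_join]
  simpa using PySem.Chars.join_singleton ",".toList s.toList

lemma pv_chars_join_append_singleton : ∀ (L : List (List Char)) (x : List Char), L ≠ [] →
    PySem.Chars.join [','] (L ++ [x]) = PySem.Chars.join [','] L ++ ',' :: x := by
  intro L
  induction L with
  | nil => intro x h; exact absurd rfl h
  | cons a L ih =>
    intro x _
    cases L with
    | nil =>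
      rw [show ([a] : List (List Char)) ++ [x] = [a, x] from rfl,
        PySem.Chars.join_cons_cons, PySem.Chars.join_singleton, PySem.Chars.join_singleton]
      simp
    | cons b L' =>
      rw [show (a :: b :: L') ++ [x] = a :: ((b :: L') ++ [x]) from rfl,
        show ((b :: L') ++ [x]) = b :: (L' ++ [x]) from rfl,
        PySem.Chars.join_cons_cons,
        show (b :: (L' ++ [x])) = (b :: L') ++ [x] from rfl,
        ih x (by simp), PySem.Chars.join_cons_cons]
      simp [List.append_assoc]

lemma pv_chars_noColon_join : ∀ (L : List (List Char)), (∀ y ∈ L, ':' ∉ y) →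
    ':' ∉ PySem.Chars.join [','] L := by
  intro L
  induction L with
  | nil => intro _; simp [PySem.Chars.join_nil]
  | cons a L ih =>
    intro h
    cases L with
    | nil =>
      rw [PySem.Chars.join_singleton]
      exact h a (by simp)
    | cons b L' =>
      rw [PySem.Chars.join_cons_cons]
      have hb : ':' ∉ PySem.Chars.join [','] (b :: L') :=
        ih (fun y hy => h y (List.mem_cons_of_mem _ hy))
      have ha : ':' ∉ a := h a (by simp)
      intro hmem
      rw [List.mem_append, List.mem_append] at hmem
      rcases hmem with (h1 | h1) | h1
      · exact ha h1
      · rw [List.mem_singleton] at h1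
        exact absurd h1 (by decide)
      · exact hb h1

-- last-colon decomposition of a string containing ':'
lemma pv_colon_decomp : ∀ (cs : List Char), ':' ∈ cs →
    ∃ u v, cs = u ++ ':' :: v ∧ ':' ∉ v := by
  intro cs
  induction cs with
  | nil => intro h; simp at h
  | cons c rest ih =>
    intro h
    by_cases hr : ':' ∈ rest
    · obtain ⟨u, v, he, hv⟩ := ih hr
      exact ⟨c :: u, v, by rw [he]; rfl, hv⟩
    · have hc : c = ':' := by
        rcases List.mem_cons.mp h with h1 | h1
        · exact h1.symm
        · exact absurd h1 hr
      exact ⟨[], rest, by rw [hc]; rfl, hr⟩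

lemma pv_rsplit_spec : ∀ (u v : List Char), ':' ∉ v →
    pvRsplitColon (u ++ ':' :: v) = (u, v) := by
  intro u
  induction u with
  | nil =>
    intro v hv
    simp [pvRsplitColon, hv]
  | cons a u ih =>
    intro v hv
    have hmem : ':' ∈ u ++ ':' :: v := by simp
    rw [show ((a :: u) ++ ':' :: v) = a :: (u ++ ':' :: v) from rfl]
    simp [pvRsplitColon, hmem, ih v hv]

lemma pv_noColon_join (cur : List String) (h : ∀ s ∈ cur, pvColon s = false) :
    pvColon (PySem.Str.join "," cur) = false := by
  rw [Bool.eq_false_iff]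
  intro hc
  rw [pv_isIn_colon, PySem.Str.toList_join, pv_toList_comma] at hc
  refine pv_chars_noColon_join (cur.map String.toList) ?_ hc
  intro y hy
  obtain ⟨s, hs, rfl⟩ := List.mem_map.mp hy
  have h2 := h s hs
  rw [Bool.eq_false_iff] at h2
  intro hmem
  exact h2 ((pv_isIn_colon s).mpr hmem)

-- rsplitting the join of colon-free strings plus one colon string
lemma pv_rsplit_join (cur : List String) (t : String)
    (hcur : ∀ s ∈ cur, pvColon s = false) (ht : pvColon t = true) :
    pvColon (PySem.Str.join "," (cur ++ [t])) = true ∧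
    pvRsplitColonStr (PySem.Str.join "," (cur ++ [t])) =
      (PySem.Str.join "," (cur ++ [(pvRsplitColonStr t).1]), (pvRsplitColonStr t).2) := by
  obtain ⟨u, v, hd, hv⟩ := pv_colon_decomp t.toList ((pv_isIn_colon t).mp ht)
  have hrt : pvRsplitColon t.toList = (u, v) := by rw [hd]; exact pv_rsplit_spec u v hv
  by_cases h : cur = []
  · subst h
    have hj : PySem.Str.join "," ([] ++ [t]) = t := by
      rw [List.nil_append]; exact pv_join_singleton t
    constructor
    · rw [hj]; exact ht
    · rw [hj]
      have hj2 : PySem.Str.join "," ([] ++ [(pvRsplitColonStr t).1]) = (pvRsplitColonStr t).1 := by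
        rw [List.nil_append]; exact pv_join_singleton _
      rw [hj2]
  · -- cur ≠ []: the last colon of the join is the last colon of t
    have hmapne : cur.map String.toList ≠ [] := by simpa using h
    have hjoin : (PySem.Str.join "," (cur ++ [t])).toList
        = (PySem.Chars.join [','] (cur.map String.toList) ++ ',' :: u) ++ ':' :: v := by
      rw [PySem.Str.toList_join, pv_toList_comma, List.map_append, List.map_singleton,
        pv_chars_join_append_singleton _ _ hmapne, hd]
      simp [List.append_assoc]
    constructor
    · rw [pv_isIn_colon, hjoin]; simp
    · have hr : pvRsplitColon (PySem.Str.join "," (cur ++ [t])).toList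
          = (PySem.Chars.join [','] (cur.map String.toList) ++ ',' :: u, v) := by
        rw [hjoin]; exact pv_rsplit_spec _ v hv
      have hfst : PySem.Str.join "," (cur ++ [(pvRsplitColonStr t).1])
          = String.ofList (PySem.Chars.join [','] (cur.map String.toList) ++ ',' :: u) := by
        apply String.toList_inj.mp
        rw [PySem.Str.toList_join, pv_toList_comma, List.map_append, List.map_singleton,
          pv_chars_join_append_singleton _ _ hmapne, pv_toList_ofList]
        simp [pvRsplitColonStr, hrt, pv_toList_ofList]
      have hsnd : (pvRsplitColonStr t).2 = String.ofList v := by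
        simp [pvRsplitColonStr, hrt]
      rw [hfst, hsnd]
      show (String.ofList (pvRsplitColon (PySem.Str.join "," (cur ++ [t])).toList).1,
            String.ofList (pvRsplitColon (PySem.Str.join "," (cur ++ [t])).toList).2) = _
      rw [hr]

lemma pv_main (ts : List String) : ∀ (cur : List String),
    (∀ s ∈ cur, pvColon s = false) →
    (pvPartsOf ts cur).flatMap pvEmit = pvAltOf ts cur := by
  induction ts with
  | nil =>
    intro cur hcur
    by_cases h : cur = []
    · subst h
      simp [pvPartsOf, pvAltOf, pv_join_nil]
    · have hnc := pv_noColon_join cur hcur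
      by_cases hj : PySem.Str.join "," cur = "" <;>
        simp [pvPartsOf, pvAltOf, pvEmit, h, hnc, hj, pv_colon_empty]
  | cons t ts ih =>
    intro cur hcur
    by_cases hc : pvColon (PySem.Str.strip t) = true
    · have hkey := pv_rsplit_join cur (PySem.Str.strip t) hcur hc
      by_cases h : cur = []
      · subst h
        simp [pvPartsOf, pvAltOf, pvEmit, hc, pv_join_singleton, ih [] (by simp)]
      · simp only [pvPartsOf, pvAltOf, hc, if_pos, h, ne_eq, not_false_iff, ite_true,
          List.flatMap_append, List.flatMap_cons, List.flatMap_nil, List.append_nil]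
        rw [ih [] (by simp)]
        simp [pvEmit, hkey.1, hkey.2]
    · simp only [pvPartsOf, pvAltOf, hc, Bool.false_eq_true, if_false, ite_false]
      apply ih
      intro s hs
      rcases List.mem_append.mp hs with h1 | h1
      · exact hcur s h1
      · rw [List.mem_singleton.mp h1]
        exact Bool.eq_false_iff.mpr hc

-- ===== VERDICT (by name: the statement is the Claim_ definition above) =====
theorem parse_extra_filter_spec : Claim_equal_parse_extra_filter := by
  intro value _
  unfold Spec_parse_extra_filter parse_extra_filter parse_extra_filter_alt
  by_cases hv : value = ""
  · simp [hv]
  · simp only [hv, ite_false]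
    rw [pv_foldlA2, pv_foldlA1, pv_foldlB]
    simp only [List.nil_append]
    exact pv_main ((PySem.Str.split? value ",").getD []) [] (by simp)
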